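-- pv_equiv track=rewrite | github.com/narender-kandhada/AI-chatbot-under-wellness | backend/app/ml/production_training_service.py | _normalize_emotion
-- ===== SOURCE A (Python) =====
-- ALLOWED_EMOTIONS = {"sad", "anxious", "calm", "angry", "lonely", "hopeful", "tired", "happy"}
--
-- EMOTION_ALIASES = {
--     "grief": "sad",
--     "burnt_out": "tired",
--     "burnout": "tired",
--     "overwhelmed": "anxious",
--     "discouraged": "sad",
--     "frustrated": "angry",
--     "hurt": "sad",
--     "hopeless": "sad",
--     "inadequate": "sad",
--     "stressed": "anxious",
-- }
--
-- EMOTION_PRIORITY = ["anxious", "sad", "angry", "lonely", "tired", "hopeful", "happy", "calm"]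
--
-- def _tokenize_label(label: str) -> list[str]:
--     normalized = label.lower().replace("/", "|").replace(",", "|")
--     return [part.strip() for part in normalized.split("|") if part.strip()]
--
-- def _pick_by_priority(candidates: list[str], priority: list[str]) -> str | None:
--     for item in priority:
--         if item in candidates:
--             return item
--     return candidates[0] if candidates else None
--
-- def _normalize_emotion(raw_emotion: str) -> tuple[str, list[str]]:
--     issues: list[str] = []
--     tokens = [_tokenize_label(raw_emotion)]
--     flattened = [token for group in tokens for token in group]
--     mapped = [EMOTION_ALIASES.get(token, token) for token in flattened]
--     allowed = [token for token in mapped if token in ALLOWED_EMOTIONS]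
--
--     if len(flattened) > 1:
--         issues.append("emotion_multilabel_normalized")
--     if not allowed:
--         issues.append("emotion_invalid")
--         return "calm", issues
--
--     normalized = _pick_by_priority(allowed, EMOTION_PRIORITY) or "calm"
--     return normalized, issues
-- ===== SOURCE B (Python) =====
-- EMOTION_ALIASES = {
--     "grief": "sad",
--     "burnt_out": "tired",
--     "burnout": "tired",
--     "overwhelmed": "anxious",
--     "discouraged": "sad",
--     "frustrated": "angry",
--     "hurt": "sad",
--     "hopeless": "sad",
--     "inadequate": "sad",
--     "stressed": "anxious",
-- }
--
-- EMOTION_PRIORITY = ["anxious", "sad", "angry", "lonely", "tired", "hopeful", "happy", "calm"]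
--
-- _RANK = {e: i for i, e in enumerate(EMOTION_PRIORITY)}
--
--
-- def _normalize_emotion(raw_emotion: str) -> tuple[str, list[str]]:
--     text = raw_emotion.lower().replace("/", "|").replace(",", "|")
--     count = 0
--     best = 8
--     for part in text.split("|"):
--         token = part.strip()
--         if not token:
--             continue
--         count += 1
--         rank = _RANK.get(EMOTION_ALIASES.get(token, token))
--         if rank is not None and rank < best:
--             best = rank
--     issues = ["emotion_multilabel_normalized"] if count > 1 else []
--     if best == 8:
--         return "calm", issues + ["emotion_invalid"]
--     return EMOTION_PRIORITY[best], issues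
-- ===== Notes on version B (the rewrite author's own statement) =====
-- stated objective: alternative
-- what changed: A builds flattened/mapped/allowed intermediate lists and then scans the priority list for the first allowed emotion; B makes a single pass over the tokens keeping only a token count and the minimal priority rank (via a rank table), indexing the priority list once at the end.
import Mathlib
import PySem

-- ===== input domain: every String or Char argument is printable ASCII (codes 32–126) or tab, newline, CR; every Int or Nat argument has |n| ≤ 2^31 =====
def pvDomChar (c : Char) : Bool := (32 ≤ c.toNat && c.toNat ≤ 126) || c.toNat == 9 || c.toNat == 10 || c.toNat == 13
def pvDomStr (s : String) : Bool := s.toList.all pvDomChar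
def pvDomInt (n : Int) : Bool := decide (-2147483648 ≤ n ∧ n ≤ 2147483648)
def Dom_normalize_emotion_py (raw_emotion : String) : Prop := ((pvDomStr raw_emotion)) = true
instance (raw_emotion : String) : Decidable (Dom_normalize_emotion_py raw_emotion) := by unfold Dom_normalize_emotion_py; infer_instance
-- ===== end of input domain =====

-- B replaces A's list-building passes and priority scan by one fold over the tokens
-- keeping a token count and the best (lowest) priority rank; same return value (objective: alternative/simpler).

-- ===== PORT A =====
def pv_ALLOWED : PySem.Set String :=
  PySem.Set.ofList ["sad", "anxious", "calm", "angry", "lonely", "hopeful", "tired", "happy"]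

def pv_ALIASES : PySem.Dict String String :=
  PySem.Dict.ofList [("grief", "sad"), ("burnt_out", "tired"), ("burnout", "tired"),
    ("overwhelmed", "anxious"), ("discouraged", "sad"), ("frustrated", "angry"),
    ("hurt", "sad"), ("hopeless", "sad"), ("inadequate", "sad"), ("stressed", "anxious")]

def pv_PRIORITY : List String :=
  ["anxious", "sad", "angry", "lonely", "tired", "hopeful", "happy", "calm"]

def pv_tokenize_label (label : String) : List String :=
  let normalized := PySem.Str.replace (PySem.Str.replace (PySem.Str.lower label) "/" "|") "," "|"
  (((PySem.Str.split? normalized "|").getD []).map PySem.Str.strip).filter (fun p => p ≠ "")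

def pv_pick_by_priority (candidates priority : List String) : Option String :=
  match priority.find? (fun item => candidates.contains item) with
  | some item => some item
  | none => candidates.head?

def normalize_emotion_py (raw_emotion : String) : String × List String :=
  let issues : List String := []
  let tokens := [pv_tokenize_label raw_emotion]
  let flattened := tokens.flatMap id
  let mapped := flattened.map (fun t => PySem.Dict.getD pv_ALIASES t t)
  let allowed := mapped.filter (fun t => PySem.Set.contains pv_ALLOWED t)
  let issues := if flattened.length > 1 then issues ++ ["emotion_multilabel_normalized"] else issues
  if allowed.isEmpty then ("calm", issues ++ ["emotion_invalid"])
  else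
    let normalized := match pv_pick_by_priority allowed pv_PRIORITY with
      | some s => if s = "" then "calm" else s   -- Python 'x or "calm"'
      | none => "calm"
    (normalized, issues)

-- ===== PORT B =====
-- _RANK = {e: i for i, e in enumerate(EMOTION_PRIORITY)}
def pv_RANK : PySem.Dict String Int :=
  PySem.Dict.ofList ((PySem.List.enumerate pv_PRIORITY).map (fun p => (p.2, p.1)))

def pv_step (st : Int × Int) (part : String) : Int × Int :=
  let token := PySem.Str.strip part
  if token = "" then st
  else
    let count := st.1 + 1
    match PySem.Dict.get? pv_RANK (PySem.Dict.getD pv_ALIASES token token) with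
    | some r => (count, if r < st.2 then r else st.2)
    | none => (count, st.2)

def normalize_emotion_py_alt (raw_emotion : String) : String × List String :=
  let text := PySem.Str.replace (PySem.Str.replace (PySem.Str.lower raw_emotion) "/" "|") "," "|"
  let st := ((PySem.Str.split? text "|").getD []).foldl pv_step ((0 : Int), (8 : Int))
  let issues := if st.1 > 1 then ["emotion_multilabel_normalized"] else []
  if st.2 = 8 then ("calm", issues ++ ["emotion_invalid"])
  else
    (match PySem.List.pyGet? pv_PRIORITY st.2 with | some s => s | none => "calm", issues)

-- ===== PRECONDITION & SPEC =====
def Spec_normalize_emotion_py (raw_emotion : String) (out : String × List String) : Prop := out = normalize_emotion_py_alt raw_emotion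
instance (raw_emotion : String) (out : String × List String) : Decidable (Spec_normalize_emotion_py raw_emotion out) := by unfold Spec_normalize_emotion_py; infer_instance

-- ===== CLAIM (what is proved, stated in full; the proofs are below) =====
def Claim_equal_normalize_emotion_py : Prop := ∀ (raw_emotion : String), Dom_normalize_emotion_py raw_emotion → Spec_normalize_emotion_py raw_emotion (normalize_emotion_py raw_emotion)

-- ===== LEMMAS AND PROOFS =====

lemma pv_RANK_eq : pv_RANK = PySem.Dict.mk [("anxious",0),("sad",1),("angry",2),("lonely",3),("tired",4),("hopeful",5),("happy",6),("calm",7)] := by decide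

lemma mem_rank (s : String) : PySem.Set.contains pv_ALLOWED s = (PySem.Dict.get? pv_RANK s).isSome := by
  rw [pv_RANK_eq]
  have h : pv_ALLOWED = ["sad", "anxious", "calm", "angry", "lonely", "hopeful", "tired", "happy"] := by decide
  rw [h, Bool.eq_iff_iff]
  simp [PySem.Dict.get?_mk_cons]
  by_cases h1 : s = "sad" <;> by_cases h2 : s = "anxious" <;> by_cases h3 : s = "calm" <;>
    by_cases h4 : s = "angry" <;> by_cases h5 : s = "lonely" <;> by_cases h6 : s = "hopeful" <;>
    by_cases h7 : s = "tired" <;> by_cases h8 : s = "happy" <;>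
    simp_all [eq_comm, PySem.Dict.get?]
def pv_rsOf (ts : List String) : List Int :=
  ts.filterMap (fun t => PySem.Dict.get? pv_RANK (PySem.Dict.getD pv_ALIASES t t))
def pv_allowedOf (ts : List String) : List String :=
  (ts.map (fun t => PySem.Dict.getD pv_ALIASES t t)).filter (fun t => PySem.Set.contains pv_ALLOWED t)
def pv_bmin (b : Int) (rs : List Int) : Int := rs.foldl (fun b r => if r < b then r else b) b
def pv_cIf (l : List String) : Int :=
  if l.contains "anxious" then 0 else if l.contains "sad" then 1 else if l.contains "angry" then 2
  else if l.contains "lonely" then 3 else if l.contains "tired" then 4 else if l.contains "hopeful" then 5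
  else if l.contains "happy" then 6 else if l.contains "calm" then 7 else 8

lemma if_lt_min (r x : Int) : (if r < x then r else x) = min x r := by
  split_ifs with h <;> omega

lemma bmin_min (rs : List Int) : ∀ a b : Int, pv_bmin (min a b) rs = min a (pv_bmin b rs) := by
  induction rs with
  | nil => intro a b; simp [pv_bmin]
  | cons r rs ih =>
    intro a b
    show pv_bmin (if r < min a b then r else min a b) rs = min a (pv_bmin (if r < b then r else b) rs)
    rw [if_lt_min, if_lt_min, min_assoc, ih]

lemma fold_parts (parts : List String) : ∀ c b : Int,
    parts.foldl pv_step (c, b)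
      = (c + ((parts.map PySem.Str.strip).filter (fun p => p ≠ "")).length,
         pv_bmin b (pv_rsOf ((parts.map PySem.Str.strip).filter (fun p => p ≠ "")))) := by
  induction parts with
  | nil => intro c b; simp [pv_bmin, pv_rsOf]
  | cons p ps ih =>
    intro c b
    by_cases h : PySem.Str.strip p = ""
    · simp only [List.foldl_cons, List.map_cons, List.filter_cons, h]
      simp [pv_step, h, ih]
    · simp only [List.foldl_cons, List.map_cons, List.filter_cons, h]
      cases hr : PySem.Dict.get? pv_RANK (PySem.Dict.getD pv_ALIASES (PySem.Str.strip p) (PySem.Str.strip p)) with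
      | none =>
        simp only [pv_step, h, if_neg, hr]
        simp [h, ih, pv_rsOf, hr]
        omega
      | some r =>
        simp only [pv_step, h, if_neg, hr]
        simp [h, ih, pv_rsOf, hr]
        constructor
        · omega
        · rfl
lemma rank_bound (s : String) (r : Int) (h : PySem.Dict.get? pv_RANK s = some r) : 0 ≤ r ∧ r < 8 := by
  rw [pv_RANK_eq] at h
  simp only [PySem.Dict.get?_mk_cons] at h
  split_ifs at h <;> simp_all [PySem.Dict.get?] <;> omega

lemma mem_of_rank_some (t : String) (r : Int)
    (hr : PySem.Dict.get? pv_RANK (PySem.Dict.getD pv_ALIASES t t) = some r) :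
    (PySem.Dict.getD pv_ALIASES t t) ∈ pv_ALLOWED := by
  rw [← PySem.Set.contains_iff, mem_rank, hr]; rfl

lemma not_mem_of_rank_none (t : String)
    (hr : PySem.Dict.get? pv_RANK (PySem.Dict.getD pv_ALIASES t t) = none) :
    (PySem.Dict.getD pv_ALIASES t t) ∉ pv_ALLOWED := by
  intro hm
  rw [← PySem.Set.contains_iff, mem_rank, hr] at hm
  simp at hm

lemma bmin8_cons (r : Int) (rs : List Int) : pv_bmin 8 (r :: rs) = min r (pv_bmin 8 rs) := by
  show pv_bmin (if r < 8 then r else 8) rs = _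
  rw [if_lt_min, min_comm, bmin_min]

lemma len_eq (ts : List String) : (pv_allowedOf ts).length = (pv_rsOf ts).length := by
  induction ts with
  | nil => rfl
  | cons t ts ih =>
    simp only [pv_allowedOf, pv_rsOf, List.map_cons, List.filter_cons, List.filterMap_cons] at *
    cases hr : PySem.Dict.get? pv_RANK (PySem.Dict.getD pv_ALIASES t t) with
    | none =>
      simp [not_mem_of_rank_none t hr]
      simpa using ih
    | some r =>
      simp [mem_of_rank_some t r hr]
      simpa using ih

set_option maxHeartbeats 1000000 in
lemma M_num (ts : List String) : pv_bmin 8 (pv_rsOf ts) = pv_cIf (pv_allowedOf ts) := by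
  induction ts with
  | nil => simp [pv_bmin, pv_rsOf, pv_allowedOf, pv_cIf]
  | cons t ts ih =>
    simp only [pv_rsOf, pv_allowedOf, List.map_cons, List.filter_cons, List.filterMap_cons] at *
    cases hr : PySem.Dict.get? pv_RANK (PySem.Dict.getD pv_ALIASES t t) with
    | none =>
      have hcb : PySem.Set.contains pv_ALLOWED (PySem.Dict.getD pv_ALIASES t t) = false := by
        rw [mem_rank, hr]; rfl
      simp only [hcb, Bool.false_eq_true, if_neg, if_false]
      exact ih
    | some r =>
      have hcb : PySem.Set.contains pv_ALLOWED (PySem.Dict.getD pv_ALIASES t t) = true := by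
        rw [mem_rank, hr]; rfl
      simp only [hcb, if_pos, if_true]
      rw [bmin8_cons, ih]
      have h2 := hr
      rw [pv_RANK_eq] at h2
      simp only [PySem.Dict.get?_mk_cons] at h2
      split_ifs at h2 with c1 c2 c3 c4 c5 c6 c7 c8
      · have hm := beq_iff_eq.mp c1
        injection h2 with h2
        rw [← hm, ← h2]
        simp only [pv_cIf, List.contains_cons]
        simp
        split_ifs <;> omega
      · have hm := beq_iff_eq.mp c2
        injection h2 with h2
        rw [← hm, ← h2]
        simp only [pv_cIf, List.contains_cons]
        simp
        split_ifs <;> omega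
      · have hm := beq_iff_eq.mp c3
        injection h2 with h2
        rw [← hm, ← h2]
        simp only [pv_cIf, List.contains_cons]
        simp
        split_ifs <;> omega
      · have hm := beq_iff_eq.mp c4
        injection h2 with h2
        rw [← hm, ← h2]
        simp only [pv_cIf, List.contains_cons]
        simp
        split_ifs <;> omega
      · have hm := beq_iff_eq.mp c5
        injection h2 with h2
        rw [← hm, ← h2]
        simp only [pv_cIf, List.contains_cons]
        simp
        split_ifs <;> omega
      · have hm := beq_iff_eq.mp c6
        injection h2 with h2
        rw [← hm, ← h2]
        simp only [pv_cIf, List.contains_cons]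
        simp
        split_ifs <;> omega
      · have hm := beq_iff_eq.mp c7
        injection h2 with h2
        rw [← hm, ← h2]
        simp only [pv_cIf, List.contains_cons]
        simp
        split_ifs <;> omega
      · have hm := beq_iff_eq.mp c8
        injection h2 with h2
        rw [← hm, ← h2]
        simp only [pv_cIf, List.contains_cons]
        simp
        split_ifs <;> omega
      · exact absurd h2 (by simp [PySem.Dict.get?])
lemma empty_iff (ts : List String) :
    (pv_allowedOf ts).isEmpty = true ↔ pv_bmin 8 (pv_rsOf ts) = 8 := by
  constructor
  · intro he
    have h0 : (pv_allowedOf ts) = [] := by simpa [List.isEmpty_iff] using he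
    have h1 : pv_rsOf ts = [] := by
      have := len_eq ts
      rw [h0] at this
      exact List.eq_nil_of_length_eq_zero this.symm
    rw [h1]; rfl
  · intro hb
    by_contra he
    have h0 : (pv_allowedOf ts) ≠ [] := by simpa [List.isEmpty_iff] using he
    have h1 : pv_rsOf ts ≠ [] := by
      intro hh
      apply h0
      have := len_eq ts
      rw [hh] at this
      exact List.eq_nil_of_length_eq_zero this
    cases hrs : pv_rsOf ts with
    | nil => exact h1 hrs
    | cons r rs =>
      have hrb : 0 ≤ r ∧ r < 8 := by
        have hmem : r ∈ pv_rsOf ts := by rw [hrs]; exact List.mem_cons_self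
        obtain ⟨t, _, hsome⟩ := List.mem_filterMap.mp hmem
        exact rank_bound _ _ hsome
      rw [hrs, bmin8_cons] at hb
      omega

lemma pick_eq (l : List String) (h : pv_cIf l ≠ 8) :
    (match pv_pick_by_priority l pv_PRIORITY with
     | some s => if s = "" then "calm" else s
     | none => "calm")
    = (match PySem.List.pyGet? pv_PRIORITY (pv_cIf l) with | some s => s | none => "calm") := by
  unfold pv_pick_by_priority pv_PRIORITY pv_cIf at *
  cases hc1 : l.contains "anxious"
  case false =>
    cases hc2 : l.contains "sad"
    case false =>
      cases hc3 : l.contains "angry"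
      case false =>
        cases hc4 : l.contains "lonely"
        case false =>
          cases hc5 : l.contains "tired"
          case false =>
            cases hc6 : l.contains "hopeful"
            case false =>
              cases hc7 : l.contains "happy"
              case false =>
                cases hc8 : l.contains "calm"
                case false =>
                  simp_all
                case true =>
                  simp_all [List.find?_cons, PySem.List.pyGet?, PySem.List.pyIdx?]
              case true =>
                simp_all [List.find?_cons, PySem.List.pyGet?, PySem.List.pyIdx?]
            case true =>
              simp_all [List.find?_cons, PySem.List.pyGet?, PySem.List.pyIdx?]
          case true =>
            simp_all [List.find?_cons, PySem.List.pyGet?, PySem.List.pyIdx?]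
        case true =>
          simp_all [List.find?_cons, PySem.List.pyGet?, PySem.List.pyIdx?]
      case true =>
        simp_all [List.find?_cons, PySem.List.pyGet?, PySem.List.pyIdx?]
    case true =>
      simp_all [List.find?_cons, PySem.List.pyGet?, PySem.List.pyIdx?]
  case true =>
    simp_all [List.find?_cons, PySem.List.pyGet?, PySem.List.pyIdx?]
lemma issues_eq (n : Nat) :
    (if n > 1 then ([] : List String) ++ ["emotion_multilabel_normalized"] else [])
      = (if (0:Int) + (n:Int) > 1 then ["emotion_multilabel_normalized"] else []) := by
  split_ifs with h1 h2 <;> first | rfl | (exfalso; omega)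

lemma core (parts : List String) :
    (let ts := (parts.map PySem.Str.strip).filter (fun p => p ≠ "");
     let flattened := List.flatMap id [ts];
     let mapped := flattened.map (fun t => PySem.Dict.getD pv_ALIASES t t);
     let allowed := mapped.filter (fun t => PySem.Set.contains pv_ALLOWED t);
     let issues := if flattened.length > 1 then ([] : List String) ++ ["emotion_multilabel_normalized"] else [];
     if allowed.isEmpty then ("calm", issues ++ ["emotion_invalid"])
     else (match pv_pick_by_priority allowed pv_PRIORITY with
           | some s => if s = "" then "calm" else s
           | none => "calm", issues))
    = (let st := parts.foldl pv_step ((0:Int), (8:Int));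
       let issues := if st.1 > 1 then ["emotion_multilabel_normalized"] else [];
       if st.2 = 8 then ("calm", issues ++ ["emotion_invalid"])
       else (match PySem.List.pyGet? pv_PRIORITY st.2 with | some s => s | none => "calm", issues)) := by
  rw [fold_parts]
  simp only [List.flatMap_cons, List.flatMap_nil, id_eq, List.append_nil]
  set ts := (parts.map PySem.Str.strip).filter (fun p => decide (p ≠ "")) with hts
  have hall : (ts.map (fun t => PySem.Dict.getD pv_ALIASES t t)).filter (fun t => PySem.Set.contains pv_ALLOWED t) = pv_allowedOf ts := rfl
  rw [hall, ← issues_eq]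
  by_cases hb : pv_bmin 8 (pv_rsOf ts) = 8
  · have he : (pv_allowedOf ts).isEmpty = true := (empty_iff ts).2 hb
    simp only [he, hb, if_true, if_pos]
  · have he : (pv_allowedOf ts).isEmpty = false := by
      cases hx : (pv_allowedOf ts).isEmpty
      · rfl
      · exact absurd ((empty_iff ts).1 hx) hb
    have hc : pv_cIf (pv_allowedOf ts) ≠ 8 := by rw [← M_num]; exact hb
    simp only [he, hb, if_false, if_neg, Bool.false_eq_true]
    rw [pick_eq _ hc, ← M_num]


set_option maxHeartbeats 400000 in
lemma bridge_A (raw : String) :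
    normalize_emotion_py raw
    = (let ts := pv_tokenize_label raw;
       let flattened := List.flatMap id [ts];
       let mapped := flattened.map (fun t => PySem.Dict.getD pv_ALIASES t t);
       let allowed := mapped.filter (fun t => PySem.Set.contains pv_ALLOWED t);
       let issues := if flattened.length > 1 then ([] : List String) ++ ["emotion_multilabel_normalized"] else [];
       if allowed.isEmpty then ("calm", issues ++ ["emotion_invalid"])
       else (match pv_pick_by_priority allowed pv_PRIORITY with
             | some s => if s = "" then "calm" else s
             | none => "calm", issues)) := rfl

set_option maxHeartbeats 400000 in
lemma bridge_B (raw : String) :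
    normalize_emotion_py_alt raw
    = (let parts := (PySem.Str.split? (PySem.Str.replace (PySem.Str.replace (PySem.Str.lower raw) "/" "|") "," "|") "|").getD [];
       let st := parts.foldl pv_step ((0 : Int), (8 : Int));
       let issues := if st.1 > 1 then ["emotion_multilabel_normalized"] else [];
       if st.2 = 8 then ("calm", issues ++ ["emotion_invalid"])
       else (match PySem.List.pyGet? pv_PRIORITY st.2 with | some s => s | none => "calm", issues)) := rfl

set_option maxHeartbeats 400000 in
lemma bridge_T (raw : String) :
    pv_tokenize_label raw
    = ((((PySem.Str.split? (PySem.Str.replace (PySem.Str.replace (PySem.Str.lower raw) "/" "|") "," "|") "|").getD []).map PySem.Str.strip).filter (fun p => p ≠ "")) := rfl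

-- ===== VERDICT (by name: the statement is the Claim_ definition above) =====
theorem normalize_emotion_py_spec : Claim_equal_normalize_emotion_py := by
  intro raw _
  unfold Spec_normalize_emotion_py
  rw [bridge_A, bridge_B, bridge_T]
  exact core _
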